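-- pv_equiv track=rewrite | github.com/KrisNguyen135/Project-Euler | p347/main.py | solve
-- ===== SOURCE A (Python) =====
-- def solve(prime1, prime2, limit):
--     result = 0
--     exp1 = 1
--     temp1 = (prime1 ** exp1) * prime2
--     while temp1 <= limit:
--         if result < temp1: result = temp1
--         exp2 = 2
--         temp2 = (prime1 ** exp1) * (prime2 ** exp2)
--         while temp2 <= limit:
--             if result < temp2: result = temp2
--             exp2 += 1
--             temp2 = (prime1 ** exp1) * (prime2 ** exp2)
--         exp1 += 1
--         temp1 = (prime1 ** exp1) * prime2
--     return result
-- ===== SOURCE B (Python) =====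
-- def solve(prime1, prime2, limit):
--     # Two-pointer sweep over precomputed power tables instead of nested while loops (alternative algorithm).
--     P1 = []  # prime1^a (a>=1) with prime1^a * prime2 <= limit, ascending
--     p = prime1
--     while p * prime2 <= limit:
--         P1.append(p)
--         p *= prime1
--     P2 = []  # prime2^b (b>=1) with prime1 * prime2^b <= limit, ascending
--     q = prime2
--     while prime1 * q <= limit:
--         P2.append(q)
--         q *= prime2
--     P2.reverse()  # descending
--     best = 0
--     j = 0
--     for p in P1:
--         while j < len(P2) and p * P2[j] > limit:
--             j += 1
--         if j < len(P2):
--             best = max(best, p * P2[j])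
--     return best
-- ===== Notes on version B (the rewrite author's own statement) =====
-- stated objective: alternative
-- what changed: Replaces A's nested while loops (which rescan all prime2-powers for every prime1-power, recomputing ** from scratch each step) with two precomputed power tables and a single two-pointer sweep: one monotone pointer over the descending prime2-power table picks the best partner for each ascending prime1-power.
-- outside the precondition, e.g. on solve(-2, -2, 20): A returns 16, B returns 0
import Mathlib
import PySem

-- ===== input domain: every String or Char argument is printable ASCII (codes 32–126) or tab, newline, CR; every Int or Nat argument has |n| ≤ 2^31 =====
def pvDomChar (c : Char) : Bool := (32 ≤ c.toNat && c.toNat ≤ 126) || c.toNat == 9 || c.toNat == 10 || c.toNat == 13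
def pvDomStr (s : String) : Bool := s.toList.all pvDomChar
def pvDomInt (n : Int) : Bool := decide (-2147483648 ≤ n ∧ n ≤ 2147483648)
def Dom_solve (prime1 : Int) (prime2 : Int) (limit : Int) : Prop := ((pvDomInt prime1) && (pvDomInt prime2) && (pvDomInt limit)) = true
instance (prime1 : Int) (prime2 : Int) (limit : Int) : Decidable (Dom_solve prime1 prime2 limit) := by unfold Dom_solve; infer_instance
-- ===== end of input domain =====

-- B replaces A's nested while loops by two precomputed power tables and a single
-- two-pointer sweep (objective: alternative — one monotone pointer instead of an inner rescan).

-- ===== PORT A =====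
-- The fuel parameter (200) is a totality device only: on Pre_ ∧ Dom the loops run
-- far fewer than 200 iterations (exponents stay below 35), so the fuel never runs out.
def solveInner (prime1 prime2 limit : Int) (exp1 : Nat) : Nat → Nat → Int → Int
  | 0, _, result => result
  | fuel+1, exp2, result =>
      let temp2 := prime1 ^ exp1 * prime2 ^ exp2
      if temp2 ≤ limit then
        solveInner prime1 prime2 limit exp1 fuel (exp2 + 1)
          (if result < temp2 then temp2 else result)
      else result

def solveOuter (prime1 prime2 limit : Int) : Nat → Nat → Int → Int
  | 0, _, result => result
  | fuel+1, exp1, result =>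
      let temp1 := prime1 ^ exp1 * prime2
      if temp1 ≤ limit then
        solveOuter prime1 prime2 limit fuel (exp1 + 1)
          (solveInner prime1 prime2 limit exp1 200 2
            (if result < temp1 then temp1 else result))
      else result

def solve (prime1 : Int) (prime2 : Int) (limit : Int) : Int :=
  solveOuter prime1 prime2 limit 200 1 0

-- ===== PORT B =====
-- (same fuel remark for the two table-building while loops)
def buildP1 (prime1 prime2 limit : Int) : Nat → Int → List Int
  | 0, _ => []
  | fuel+1, p =>
      if p * prime2 ≤ limit then p :: buildP1 prime1 prime2 limit fuel (p * prime1) else []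

def buildP2 (prime1 prime2 limit : Int) : Nat → Int → List Int
  | 0, _ => []
  | fuel+1, q =>
      if prime1 * q ≤ limit then q :: buildP2 prime1 prime2 limit fuel (q * prime2) else []

def advance (P2 : List Int) (p limit : Int) (j : Nat) : Nat :=
  if h : j < P2.length then
    if p * P2.getD j 0 > limit then advance P2 p limit (j + 1) else j
  else j
termination_by P2.length - j
decreasing_by omega

def sweep (P2 : List Int) (limit : Int) : List Int → Nat → Int → Int
  | [], _, best => best
  | p :: rest, j, best =>
      let j' := advance P2 p limit j
      let best' := if j' < P2.length then max best (p * P2.getD j' 0) else best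
      sweep P2 limit rest j' best'

def solve_alt (prime1 : Int) (prime2 : Int) (limit : Int) : Int :=
  let P1 := buildP1 prime1 prime2 limit 200 prime1
  let P2 := (buildP2 prime1 prime2 limit 200 prime2).reverse
  sweep P2 limit P1 0 0

-- ===== PRECONDITION & SPEC =====
-- Pre_ restricts to the task's natural domain (two prime bases, hence ≥ 2): outside it
-- A may loop forever (e.g. prime1 = 1, or a base ≤ 0 with products never exceeding limit)
-- or enumerate sign-alternating products whose truncation point is an accident of A's
-- loop order (e.g. solve (-2) (-2) 20 = 16 while the table sweep gives 0).
def Pre_solve (prime1 : Int) (prime2 : Int) (limit : Int) : Prop :=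
  2 ≤ prime1 ∧ 2 ≤ prime2
instance (prime1 : Int) (prime2 : Int) (limit : Int) : Decidable (Pre_solve prime1 prime2 limit) := by
  unfold Pre_solve; infer_instance

def pvWitness_solve : Int × Int × Int := (2, 3, 100)

def Spec_solve (prime1 : Int) (prime2 : Int) (limit : Int) (out : Int) : Prop := out = solve_alt prime1 prime2 limit
instance (prime1 : Int) (prime2 : Int) (limit : Int) (out : Int) : Decidable (Spec_solve prime1 prime2 limit out) := by unfold Spec_solve; infer_instance

-- ===== CLAIM (what is proved, stated in full; the proofs are below) =====
def Claim_equal_solve : Prop := ∀ (prime1 : Int) (prime2 : Int) (limit : Int), Dom_solve prime1 prime2 limit → Pre_solve prime1 prime2 limit → Spec_solve prime1 prime2 limit (solve prime1 prime2 limit)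

-- ===== LEMMAS AND PROOFS =====

-- kOf a = the largest b (≤ 300) with p1^a * p2^b ≤ limit, 0 if none
def kOf (p1 p2 limit : Int) (a : Nat) : Nat :=
  Nat.findGreatest (fun b => p1 ^ a * p2 ^ b ≤ limit) 300

-- aMaxN = the largest a (≤ 300) with p1^a * p2 ≤ limit, 0 if none
def aMaxN (p1 p2 limit : Int) : Nat :=
  Nat.findGreatest (fun a => p1 ^ a * p2 ≤ limit) 300

-- the best candidate in row a
def top (p1 p2 limit : Int) (a : Nat) : Int := p1 ^ a * p2 ^ (kOf p1 p2 limit a)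

-- the best candidates of rows s, s+1, …, aMaxN
def tops (p1 p2 limit : Int) (s : Nat) : List Int :=
  (List.range (aMaxN p1 p2 limit + 1 - s)).map (fun i => top p1 p2 limit (s + i))

theorem fg_spec_pos (P : Nat → Prop) [DecidablePred P] (n : Nat)
    (h : 0 < Nat.findGreatest P n) : P (Nat.findGreatest P n) :=
  ((Nat.findGreatest_eq_iff.mp rfl).2.1) (Nat.pos_iff_ne_zero.mp h)

theorem ite_max (r t : Int) : (if r < t then t else r) = max r t := by
  split <;> omega

theorem range_map_shift (g : Nat → Int) (m s : Nat) (h : s ≤ m) :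
    (List.range (m + 1 - s)).map (fun i => g (s + i)) =
      g s :: (List.range (m + 1 - (s + 1))).map (fun i => g (s + 1 + i)) := by
  have h1 : m + 1 - s = (m + 1 - (s + 1)) + 1 := by omega
  rw [h1, List.range_succ_eq_map, List.map_cons, List.map_map]
  refine congrArg₂ _ (by simp) ?_
  apply List.map_congr_left
  intro i _
  show g (s + (i + 1)) = g (s + 1 + i)
  congr 1
  omega

theorem big (p1 p2 limit : Int) (hp1 : 2 ≤ p1) (hp2 : 2 ≤ p2)
    (hlim : limit ≤ 2147483648) (a b : Nat) (h : 32 ≤ a + b) :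
    limit < p1 ^ a * p2 ^ b := by
  have h2a : (2 : Int) ^ a ≤ p1 ^ a := pow_le_pow_left₀ (by omega) hp1 a
  have h2b : (2 : Int) ^ b ≤ p2 ^ b := pow_le_pow_left₀ (by omega) hp2 b
  calc limit ≤ 2147483648 := hlim
    _ < (2 : Int) ^ 32 := by norm_num
    _ ≤ (2 : Int) ^ (a + b) := pow_le_pow_right₀ (by omega) h
    _ = (2 : Int) ^ a * (2 : Int) ^ b := pow_add 2 a b
    _ ≤ p1 ^ a * p2 ^ b :=
        mul_le_mul h2a h2b (pow_nonneg (by omega) b)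
          (le_trans (pow_nonneg (by omega) a) h2a)

-- the candidate is antitone in b
theorem cand_mono_b (p1 p2 limit : Int) (hp1 : 2 ≤ p1) (hp2 : 2 ≤ p2)
    (a b b' : Nat) (hb : b ≤ b') (h : p1 ^ a * p2 ^ b' ≤ limit) :
    p1 ^ a * p2 ^ b ≤ limit := by
  have h1 : p2 ^ b ≤ p2 ^ b' := pow_le_pow_right₀ (by omega) hb
  have h2 : p1 ^ a * p2 ^ b ≤ p1 ^ a * p2 ^ b' :=
    mul_le_mul_of_nonneg_left h1 (pow_nonneg (by omega) a)
  exact le_trans h2 h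

-- the candidate is antitone in a
theorem cand_mono_a (p1 p2 limit : Int) (hp1 : 2 ≤ p1) (hp2 : 2 ≤ p2)
    (a a' b : Nat) (ha : a ≤ a') (h : p1 ^ a' * p2 ^ b ≤ limit) :
    p1 ^ a * p2 ^ b ≤ limit := by
  have h1 : p1 ^ a ≤ p1 ^ a' := pow_le_pow_right₀ (by omega) ha
  have h2 : p1 ^ a * p2 ^ b ≤ p1 ^ a' * p2 ^ b :=
    mul_le_mul_of_nonneg_right h1 (pow_nonneg (by omega) b)
  exact le_trans h2 h

theorem kOf_antitone (p1 p2 limit : Int) (hp1 : 2 ≤ p1) (hp2 : 2 ≤ p2)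
    (a a' : Nat) (ha : a ≤ a') :
    kOf p1 p2 limit a' ≤ kOf p1 p2 limit a :=
  Nat.findGreatest_mono (fun b hb => cand_mono_a p1 p2 limit hp1 hp2 a a' b ha hb) le_rfl

-- rows up to aMaxN are nonempty
theorem aMax_mem (p1 p2 limit : Int) (hp1 : 2 ≤ p1) (hp2 : 2 ≤ p2)
    (a : Nat) (h1 : 1 ≤ a) (ha : a ≤ aMaxN p1 p2 limit) :
    p1 ^ a * p2 ≤ limit := by
  have hpos : 0 < aMaxN p1 p2 limit := lt_of_lt_of_le h1 ha
  have hspec : p1 ^ (aMaxN p1 p2 limit) * p2 ≤ limit :=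
    fg_spec_pos (fun a => p1 ^ a * p2 ≤ limit) 300 hpos
  have := cand_mono_a p1 p2 limit hp1 hp2 a (aMaxN p1 p2 limit) 1 ha
    (by rwa [pow_one])
  rwa [pow_one] at this

theorem tops_nil (p1 p2 limit : Int) (s : Nat) (h : aMaxN p1 p2 limit < s) :
    tops p1 p2 limit s = [] := by
  have h0 : aMaxN p1 p2 limit + 1 - s = 0 := by omega
  rw [tops, h0, List.range_zero, List.map_nil]

theorem tops_cons (p1 p2 limit : Int) (s : Nat) (h : s ≤ aMaxN p1 p2 limit) :
    tops p1 p2 limit s = top p1 p2 limit s :: tops p1 p2 limit (s + 1) :=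
  range_map_shift (top p1 p2 limit) (aMaxN p1 p2 limit) s h

-- characterization of A's inner loop
theorem innerA_char (p1 p2 limit : Int) (hp1 : 2 ≤ p1) (hp2 : 2 ≤ p2) (a : Nat) :
    ∀ (f e2 : Nat) (r : Int), 2 ≤ e2 → e2 + f ≤ 300 →
      limit < p1 ^ a * p2 ^ (e2 + f) →
      solveInner p1 p2 limit a f e2 r =
        if p1 ^ a * p2 ^ e2 ≤ limit then max r (top p1 p2 limit a) else r := by
  intro f
  induction f with
  | zero =>
    intro e2 r h2 hb hbig
    rw [if_neg (by simpa using not_le.mpr hbig)]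
    rfl
  | succ f ih =>
    intro e2 r h2 hb hbig
    show (if p1 ^ a * p2 ^ e2 ≤ limit then
            solveInner p1 p2 limit a f (e2 + 1)
              (if r < p1 ^ a * p2 ^ e2 then p1 ^ a * p2 ^ e2 else r)
          else r) = _
    by_cases hP : p1 ^ a * p2 ^ e2 ≤ limit
    · rw [if_pos hP, if_pos hP, ite_max]
      rw [ih (e2 + 1) _ (by omega) (by omega)
        (by rw [show e2 + 1 + f = e2 + (f + 1) by omega]; exact hbig)]
      have htople : p1 ^ a * p2 ^ (kOf p1 p2 limit a) ≤ limit :=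
        Nat.findGreatest_spec (P := fun b => p1 ^ a * p2 ^ b ≤ limit) (n := 300)
          (m := e2) (by omega) hP
      have hke : e2 ≤ kOf p1 p2 limit a := Nat.le_findGreatest (by omega) hP
      have hcur : p1 ^ a * p2 ^ e2 ≤ top p1 p2 limit a := by
        rw [top]
        exact mul_le_mul_of_nonneg_left (pow_le_pow_right₀ (by omega) hke)
          (pow_nonneg (by omega) a)
      by_cases hP1 : p1 ^ a * p2 ^ (e2 + 1) ≤ limit
      · rw [if_pos hP1, max_assoc, max_eq_right hcur]
      · rw [if_neg hP1]
        have hkeq : kOf p1 p2 limit a = e2 := by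
          refine le_antisymm ?_ hke
          by_contra hgt
          rw [not_le] at hgt
          exact hP1 (cand_mono_b p1 p2 limit hp1 hp2 a (e2 + 1)
            (kOf p1 p2 limit a) hgt htople)
        rw [top, hkeq]
    · rw [if_neg hP, if_neg hP]

-- characterization of A's outer loop
theorem outerA_char (p1 p2 limit : Int) (hp1 : 2 ≤ p1) (hp2 : 2 ≤ p2)
    (hlim : limit ≤ 2147483648) :
    ∀ (f e1 : Nat) (r : Int), 1 ≤ e1 → e1 + f ≤ 300 →
      limit < p1 ^ (e1 + f) * p2 →
      solveOuter p1 p2 limit f e1 r = (tops p1 p2 limit e1).foldl max r := by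
  intro f
  induction f with
  | zero =>
    intro e1 r h1 hb hbig
    have hnot : ¬ (p1 ^ e1 * p2 ≤ limit) := by simpa using not_le.mpr hbig
    have hlt : aMaxN p1 p2 limit < e1 := by
      by_contra hle
      rw [not_lt] at hle
      exact hnot (aMax_mem p1 p2 limit hp1 hp2 e1 h1 hle)
    rw [tops_nil p1 p2 limit e1 hlt]
    rfl
  | succ f ih =>
    intro e1 r h1 hb hbig
    show (if p1 ^ e1 * p2 ≤ limit then
            solveOuter p1 p2 limit f (e1 + 1)
              (solveInner p1 p2 limit e1 200 2
                (if r < p1 ^ e1 * p2 then p1 ^ e1 * p2 else r))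
          else r) = _
    by_cases hP : p1 ^ e1 * p2 ≤ limit
    · rw [if_pos hP, ite_max]
      have hmem1 : p1 ^ e1 * p2 ^ 1 ≤ limit := by rwa [pow_one]
      have hk1 : 1 ≤ kOf p1 p2 limit e1 := Nat.le_findGreatest (by omega) hmem1
      have htople : p1 ^ e1 * p2 ^ (kOf p1 p2 limit e1) ≤ limit :=
        Nat.findGreatest_spec (P := fun b => p1 ^ e1 * p2 ^ b ≤ limit) (n := 300)
          (m := 1) (by omega) hmem1
      have he1aMax : e1 ≤ aMaxN p1 p2 limit := Nat.le_findGreatest (by omega) hP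
      have ht1top : p1 ^ e1 * p2 ≤ top p1 p2 limit e1 := by
        rw [top]
        calc p1 ^ e1 * p2 = p1 ^ e1 * p2 ^ 1 := by rw [pow_one]
          _ ≤ p1 ^ e1 * p2 ^ (kOf p1 p2 limit e1) :=
              mul_le_mul_of_nonneg_left (pow_le_pow_right₀ (by omega) hk1)
                (pow_nonneg (by omega) e1)
      rw [innerA_char p1 p2 limit hp1 hp2 e1 200 2 _ (by omega) (by omega)
        (big p1 p2 limit hp1 hp2 hlim e1 202 (by omega))]
      have hr2 : (if p1 ^ e1 * p2 ^ 2 ≤ limit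
            then max (max r (p1 ^ e1 * p2)) (top p1 p2 limit e1)
            else max r (p1 ^ e1 * p2)) = max r (top p1 p2 limit e1) := by
        by_cases hP2 : p1 ^ e1 * p2 ^ 2 ≤ limit
        · rw [if_pos hP2, max_assoc, max_eq_right ht1top]
        · rw [if_neg hP2]
          have hkeq : kOf p1 p2 limit e1 = 1 := by
            refine le_antisymm ?_ hk1
            by_contra hgt
            rw [not_le] at hgt
            exact hP2 (cand_mono_b p1 p2 limit hp1 hp2 e1 2
              (kOf p1 p2 limit e1) hgt htople)
          rw [top, hkeq, pow_one]
      rw [hr2]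
      rw [ih (e1 + 1) _ (by omega) (by omega)
        (by rw [show e1 + 1 + f = e1 + (f + 1) by omega]; exact hbig)]
      rw [tops_cons p1 p2 limit e1 he1aMax]
      rfl
    · rw [if_neg hP]
      have hlt : aMaxN p1 p2 limit < e1 := by
        by_contra hle
        rw [not_lt] at hle
        exact hP (aMax_mem p1 p2 limit hp1 hp2 e1 h1 hle)
      rw [tops_nil p1 p2 limit e1 hlt]
      rfl

-- characterization of B's first table
theorem buildP1_char (p1 p2 limit : Int) (hp1 : 2 ≤ p1) (hp2 : 2 ≤ p2) :
    ∀ (f s : Nat), 1 ≤ s → s + f ≤ 300 → limit < p1 ^ (s + f) * p2 →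
      buildP1 p1 p2 limit f (p1 ^ s) =
        (List.range (aMaxN p1 p2 limit + 1 - s)).map (fun i => p1 ^ (s + i)) := by
  intro f
  induction f with
  | zero =>
    intro s h1 hb hbig
    have hnot : ¬ (p1 ^ s * p2 ≤ limit) := by simpa using not_le.mpr hbig
    have hlt : aMaxN p1 p2 limit < s := by
      by_contra hle
      rw [not_lt] at hle
      exact hnot (aMax_mem p1 p2 limit hp1 hp2 s h1 hle)
    rw [show aMaxN p1 p2 limit + 1 - s = 0 by omega, List.range_zero, List.map_nil]
    rfl
  | succ f ih =>
    intro s h1 hb hbig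
    show (if p1 ^ s * p2 ≤ limit
          then p1 ^ s :: buildP1 p1 p2 limit f (p1 ^ s * p1)
          else []) = _
    by_cases hP : p1 ^ s * p2 ≤ limit
    · rw [if_pos hP, show p1 ^ s * p1 = p1 ^ (s + 1) from (pow_succ p1 s).symm]
      rw [ih (s + 1) (by omega) (by omega)
        (by rw [show s + 1 + f = s + (f + 1) by omega]; exact hbig)]
      have hsaMax : s ≤ aMaxN p1 p2 limit := Nat.le_findGreatest (by omega) hP
      exact (range_map_shift (fun i => p1 ^ i) (aMaxN p1 p2 limit) s hsaMax).symm
    · rw [if_neg hP]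
      have hlt : aMaxN p1 p2 limit < s := by
        by_contra hle
        rw [not_lt] at hle
        exact hP (aMax_mem p1 p2 limit hp1 hp2 s h1 hle)
      rw [show aMaxN p1 p2 limit + 1 - s = 0 by omega, List.range_zero, List.map_nil]

-- characterization of B's second table
theorem buildP2_char (p1 p2 limit : Int) (hp1 : 2 ≤ p1) (hp2 : 2 ≤ p2) :
    ∀ (f s : Nat), 1 ≤ s → s + f ≤ 300 → limit < p1 * p2 ^ (s + f) →
      buildP2 p1 p2 limit f (p2 ^ s) =
        (List.range (kOf p1 p2 limit 1 + 1 - s)).map (fun i => p2 ^ (s + i)) := by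
  intro f
  induction f with
  | zero =>
    intro s h1 hb hbig
    have hnot : ¬ (p1 * p2 ^ s ≤ limit) := by simpa using not_le.mpr hbig
    have hlt : kOf p1 p2 limit 1 < s := by
      by_contra hle
      rw [not_lt] at hle
      have hpos : 0 < kOf p1 p2 limit 1 := lt_of_lt_of_le h1 hle
      have hspec : p1 ^ 1 * p2 ^ (kOf p1 p2 limit 1) ≤ limit :=
        fg_spec_pos (fun b => p1 ^ 1 * p2 ^ b ≤ limit) 300 hpos
      have := cand_mono_b p1 p2 limit hp1 hp2 1 s (kOf p1 p2 limit 1) hle hspec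
      rw [pow_one] at this
      exact hnot this
    rw [show kOf p1 p2 limit 1 + 1 - s = 0 by omega, List.range_zero, List.map_nil]
    rfl
  | succ f ih =>
    intro s h1 hb hbig
    show (if p1 * p2 ^ s ≤ limit
          then p2 ^ s :: buildP2 p1 p2 limit f (p2 ^ s * p2)
          else []) = _
    by_cases hP : p1 * p2 ^ s ≤ limit
    · rw [if_pos hP, show p2 ^ s * p2 = p2 ^ (s + 1) from (pow_succ p2 s).symm]
      rw [ih (s + 1) (by omega) (by omega)
        (by rw [show s + 1 + f = s + (f + 1) by omega]; exact hbig)]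
      have hsk : s ≤ kOf p1 p2 limit 1 :=
        Nat.le_findGreatest (by omega) (by rwa [pow_one])
      exact (range_map_shift (fun i => p2 ^ i) (kOf p1 p2 limit 1) s hsk).symm
    · rw [if_neg hP]
      have hlt : kOf p1 p2 limit 1 < s := by
        by_contra hle
        rw [not_lt] at hle
        have hpos : 0 < kOf p1 p2 limit 1 := lt_of_lt_of_le h1 hle
        have hspec : p1 ^ 1 * p2 ^ (kOf p1 p2 limit 1) ≤ limit :=
          fg_spec_pos (fun b => p1 ^ 1 * p2 ^ b ≤ limit) 300 hpos
        have := cand_mono_b p1 p2 limit hp1 hp2 1 s (kOf p1 p2 limit 1) hle hspec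
        rw [pow_one] at this
        exact hP this
      rw [show kOf p1 p2 limit 1 + 1 - s = 0 by omega, List.range_zero, List.map_nil]

-- characterization of B's pointer advance
theorem advance_char (p1 p2 limit : Int) (hp1 : 2 ≤ p1) (hp2 : 2 ≤ p2)
    (Q : List Int) (hQlen : Q.length = kOf p1 p2 limit 1)
    (hQget : ∀ j, j < kOf p1 p2 limit 1 → Q.getD j 0 = p2 ^ (kOf p1 p2 limit 1 - j))
    (a : Nat) (ha : 1 ≤ a) (haMax : a ≤ aMaxN p1 p2 limit) :
    ∀ (n j : Nat), j ≤ kOf p1 p2 limit 1 - kOf p1 p2 limit a →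
      kOf p1 p2 limit 1 - kOf p1 p2 limit a - j = n →
      advance Q (p1 ^ a) limit j = kOf p1 p2 limit 1 - kOf p1 p2 limit a := by
  have hmem1 : p1 ^ a * p2 ^ 1 ≤ limit := by
    rw [pow_one]; exact aMax_mem p1 p2 limit hp1 hp2 a ha haMax
  have hk1 : 1 ≤ kOf p1 p2 limit a :=
    Nat.le_findGreatest (P := fun b => p1 ^ a * p2 ^ b ≤ limit) (by omega) hmem1
  have htople : p1 ^ a * p2 ^ (kOf p1 p2 limit a) ≤ limit :=
    Nat.findGreatest_spec (P := fun b => p1 ^ a * p2 ^ b ≤ limit) (n := 300)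
      (m := 1) (by omega) hmem1
  have hkK : kOf p1 p2 limit a ≤ kOf p1 p2 limit 1 :=
    kOf_antitone p1 p2 limit hp1 hp2 1 a ha
  have hK300 : kOf p1 p2 limit 1 ≤ 300 := Nat.findGreatest_le 300
  intro n
  induction n with
  | zero =>
    intro j hj hn
    have hjeq : j = kOf p1 p2 limit 1 - kOf p1 p2 limit a := by omega
    have hjK : j < Q.length := by rw [hQlen]; omega
    rw [advance, dif_pos hjK, hQget j (by omega),
      show kOf p1 p2 limit 1 - j = kOf p1 p2 limit a by omega,
      if_neg (not_lt.mpr htople)]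
    omega
  | succ n ihn =>
    intro j hj hn
    have hjlt : j < kOf p1 p2 limit 1 - kOf p1 p2 limit a := by omega
    have hjK : j < Q.length := by rw [hQlen]; omega
    have hnmem : ¬ (p1 ^ a * p2 ^ (kOf p1 p2 limit 1 - j) ≤ limit) :=
      Nat.findGreatest_is_greatest (P := fun b => p1 ^ a * p2 ^ b ≤ limit) (n := 300)
        (show kOf p1 p2 limit a < kOf p1 p2 limit 1 - j by omega)
        (show kOf p1 p2 limit 1 - j ≤ 300 by omega)
    rw [advance, dif_pos hjK, hQget j (by omega), if_pos (not_le.mp hnmem)]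
    exact ihn (j + 1) (by omega) (by omega)

-- characterization of B's sweep
theorem sweep_char (p1 p2 limit : Int) (hp1 : 2 ≤ p1) (hp2 : 2 ≤ p2)
    (Q : List Int) (hQlen : Q.length = kOf p1 p2 limit 1)
    (hQget : ∀ j, j < kOf p1 p2 limit 1 → Q.getD j 0 = p2 ^ (kOf p1 p2 limit 1 - j)) :
    ∀ (n s : Nat) (j : Nat) (best : Int), 1 ≤ s → aMaxN p1 p2 limit + 1 - s = n →
      j ≤ kOf p1 p2 limit 1 - kOf p1 p2 limit s →
      sweep Q limit
          ((List.range (aMaxN p1 p2 limit + 1 - s)).map (fun i => p1 ^ (s + i))) j best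
        = (tops p1 p2 limit s).foldl max best := by
  intro n
  induction n with
  | zero =>
    intro s j best h1 hn hj
    rw [hn, List.range_zero, List.map_nil, tops_nil p1 p2 limit s (by omega)]
    rfl
  | succ n ihn =>
    intro s j best h1 hn hj
    have hs : s ≤ aMaxN p1 p2 limit := by omega
    have hmem1 : p1 ^ s * p2 ^ 1 ≤ limit := by
      rw [pow_one]; exact aMax_mem p1 p2 limit hp1 hp2 s h1 hs
    have hk1 : 1 ≤ kOf p1 p2 limit s :=
      Nat.le_findGreatest (P := fun b => p1 ^ s * p2 ^ b ≤ limit) (by omega) hmem1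
    have hkK : kOf p1 p2 limit s ≤ kOf p1 p2 limit 1 :=
      kOf_antitone p1 p2 limit hp1 hp2 1 s h1
    have hadv : advance Q (p1 ^ s) limit j
        = kOf p1 p2 limit 1 - kOf p1 p2 limit s :=
      advance_char p1 p2 limit hp1 hp2 Q hQlen hQget s h1 hs
        (kOf p1 p2 limit 1 - kOf p1 p2 limit s - j) j hj rfl
    rw [range_map_shift (fun i => p1 ^ i) (aMaxN p1 p2 limit) s hs]
    show sweep Q limit (_ :: _) j best = _
    rw [sweep, hadv]
    have hjK : kOf p1 p2 limit 1 - kOf p1 p2 limit s < Q.length := by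
      rw [hQlen]; omega
    rw [if_pos hjK,
      hQget _ (by omega),
      show kOf p1 p2 limit 1 - (kOf p1 p2 limit 1 - kOf p1 p2 limit s)
          = kOf p1 p2 limit s by omega]
    rw [tops_cons p1 p2 limit s hs, List.foldl_cons]
    exact ihn (s + 1) _ _ (by omega) (by omega)
      (by have := kOf_antitone p1 p2 limit hp1 hp2 s (s + 1) (by omega); omega)

theorem solve_spec : Claim_equal_solve := by
  intro prime1 prime2 limit hdom hpre
  obtain ⟨hp1, hp2⟩ := hpre
  have hlim : limit ≤ 2147483648 := by
    simp only [Dom_solve, pvDomInt, Bool.and_eq_true, decide_eq_true_eq] at hdom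
    exact hdom.2.2
  unfold Spec_solve
  have hA : solve prime1 prime2 limit = (tops prime1 prime2 limit 1).foldl max 0 := by
    rw [solve]
    exact outerA_char prime1 prime2 limit hp1 hp2 hlim 200 1 0 (by omega) (by omega)
      (by have := big prime1 prime2 limit hp1 hp2 hlim 201 1 (by omega)
          rwa [pow_one] at this)
  have hP1 : buildP1 prime1 prime2 limit 200 prime1
      = (List.range (aMaxN prime1 prime2 limit + 1 - 1)).map (fun i => prime1 ^ (1 + i)) := by
    have h := buildP1_char prime1 prime2 limit hp1 hp2 200 1 (by omega) (by omega)
      (by have := big prime1 prime2 limit hp1 hp2 hlim 201 1 (by omega)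
          rwa [pow_one] at this)
    rwa [pow_one] at h
  have hP2 : buildP2 prime1 prime2 limit 200 prime2
      = (List.range (kOf prime1 prime2 limit 1 + 1 - 1)).map (fun i => prime2 ^ (1 + i)) := by
    have h := buildP2_char prime1 prime2 limit hp1 hp2 200 1 (by omega) (by omega)
      (by have := big prime1 prime2 limit hp1 hp2 hlim 1 201 (by omega)
          rwa [pow_one] at this)
    rwa [pow_one] at h
  have hQlen : ((buildP2 prime1 prime2 limit 200 prime2).reverse).length
      = kOf prime1 prime2 limit 1 := by
    rw [hP2]; simp
  have hQget : ∀ j, j < kOf prime1 prime2 limit 1 →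
      ((buildP2 prime1 prime2 limit 200 prime2).reverse).getD j 0
        = prime2 ^ (kOf prime1 prime2 limit 1 - j) := by
    intro j hj
    rw [hP2]
    rw [List.getD_eq_getElem _ _ (by simp; omega)]
    rw [List.getElem_reverse]
    simp only [List.getElem_map, List.getElem_range, List.length_map, List.length_range]
    congr 1
    omega
  have hB : solve_alt prime1 prime2 limit = (tops prime1 prime2 limit 1).foldl max 0 := by
    show sweep ((buildP2 prime1 prime2 limit 200 prime2).reverse) limit
        (buildP1 prime1 prime2 limit 200 prime1) 0 0 = _
    rw [hP1]
    exact sweep_char prime1 prime2 limit hp1 hp2 _ hQlen hQget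
      (aMaxN prime1 prime2 limit + 1 - 1) 1 0 0 (by omega) rfl (by omega)
  rw [hA, hB]
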